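-- pv_equiv track=rewrite | github.com/joseph-webber/agentic-brain | src/agentic_brain/documents/services/office/rtf.py | _skip_group
-- ===== SOURCE A (Python) =====
-- def _skip_group(data: str, index: int) -> int:
--     """Skip an entire group starting at ``index`` (which must point to '{')."""
--     depth = 0
--     i = index
--     length = len(data)
--     while i < length:
--         if data[i] == "{":
--             depth += 1
--         elif data[i] == "}":
--             depth -= 1
--             if depth == 0:
--                 return i + 1
--         i += 1
--     return length
-- ===== SOURCE B (Python) =====
-- def _skip_group(data: str, index: int) -> int:
--     """Skip an entire group starting at ``index`` (which must point to '{')."""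
--     depth = 0
--     i = index
--     n = len(data)
--     while True:
--         o = data.find("{", i)
--         c = data.find("}", i)
--         if c == -1:
--             return n
--         if o != -1 and o < c:
--             depth += 1
--             i = o + 1
--         else:
--             depth -= 1
--             if depth == 0:
--                 return c + 1
--             i = c + 1
-- ===== Notes on version B (the rewrite author's own statement) =====
-- stated objective: faster
-- what changed: Replaces the char-by-char scan with depth bookkeeping at every character by a loop that jumps directly between successive brace positions found with str.find, skipping all non-brace characters wholesale.
-- outside the precondition, e.g. on _skip_group('a{}', -3): A returns 0, B returns 3; on _skip_group('ab', -5): A raises IndexError, B returns 2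
import Mathlib
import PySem

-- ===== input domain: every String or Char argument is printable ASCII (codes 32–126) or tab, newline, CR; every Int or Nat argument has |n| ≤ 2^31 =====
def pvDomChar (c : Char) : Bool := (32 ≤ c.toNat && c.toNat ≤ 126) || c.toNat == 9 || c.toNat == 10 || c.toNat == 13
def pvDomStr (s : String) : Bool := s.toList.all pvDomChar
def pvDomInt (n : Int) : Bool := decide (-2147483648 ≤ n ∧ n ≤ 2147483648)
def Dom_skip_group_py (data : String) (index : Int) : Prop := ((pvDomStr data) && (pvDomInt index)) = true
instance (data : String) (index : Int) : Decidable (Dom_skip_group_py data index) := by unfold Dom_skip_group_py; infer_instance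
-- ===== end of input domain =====

-- B replaces A's char-by-char scan by jumps between successive brace positions found with str.find (measured faster in a timing run); same return value on every index ≥ 0.

-- ===== PORT A =====
-- the while-loop of A: state (depth, i); fuel = remaining iterations + 1 (the loop runs at most length - i times)
def skipAGo (cs : List Char) (length : Int) (depth i : Int) : Nat → Int
  | 0 => length
  | fuel + 1 =>
    if i < length then
      match PySem.List.pyGet? cs i with        -- data[i]; none = IndexError (only for index < -len, outside Pre_)
      | none => length
      | some ch =>
        if ch = '{' then skipAGo cs length (depth + 1) (i + 1) fuel
        else if ch = '}' then
          if depth - 1 = 0 then i + 1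
          else skipAGo cs length (depth - 1) (i + 1) fuel
        else skipAGo cs length depth (i + 1) fuel
    else length

def skip_group_py (data : String) (index : Int) : Int :=
  let cs := data.toList
  let length : Int := (cs.length : Int)
  skipAGo cs length 0 index ((length - index).toNat + 1)

-- ===== PORT B =====
-- the while-loop of B: each iteration jumps to the next brace; i strictly increases, so the fuel suffices
def skipBGo (cs : List Char) (n : Int) (depth i : Int) : Nat → Int
  | 0 => n
  | fuel + 1 =>
    let o := PySem.Chars.findFrom cs ['{'] i none   -- data.find("{", i)
    let c := PySem.Chars.findFrom cs ['}'] i none   -- data.find("}", i)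
    if c = -1 then n
    else if o ≠ -1 ∧ o < c then skipBGo cs n (depth + 1) (o + 1) fuel
    else if depth - 1 = 0 then c + 1
    else skipBGo cs n (depth - 1) (c + 1) fuel

def skip_group_py_alt (data : String) (index : Int) : Int :=
  let cs := data.toList
  let n : Int := (cs.length : Int)
  skipBGo cs n 0 index ((n - index).toNat + 1)

-- ===== PRECONDITION & SPEC =====
-- Pre_ restricts to the function's documented domain: index ≥ 0 (the docstring requires index to point into data at '{').
-- For negative index A either raises IndexError (index < -len(data)) or scans through Python's negative-index wraparound
-- (the tail of data and then the whole string again) — outside the natural domain; B's find-based jumps do not reproduce it.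
def Pre_skip_group_py (data : String) (index : Int) : Prop := 0 ≤ index
instance (data : String) (index : Int) : Decidable (Pre_skip_group_py data index) := by unfold Pre_skip_group_py; infer_instance
def pvWitness_skip_group_py : String × Int := ("{a{b}c}", 0)
def Spec_skip_group_py (data : String) (index : Int) (out : Int) : Prop := out = skip_group_py_alt data index
instance (data : String) (index : Int) (out : Int) : Decidable (Spec_skip_group_py data index out) := by unfold Spec_skip_group_py; infer_instance

-- ===== CLAIM (what is proved, stated in full; the proofs are below) =====
def Claim_equal_skip_group_py : Prop := ∀ (data : String) (index : Int), Dom_skip_group_py data index → Pre_skip_group_py data index → Spec_skip_group_py data index (skip_group_py data index)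

-- ===== LEMMAS AND PROOFS =====

-- reference semantics: grpLen d l = some k if A's loop, started with depth d at the suffix l, returns after consuming k chars;
-- none if it runs off the end
def grpLen (d : Int) : List Char → Option Nat
  | [] => none
  | ch :: t =>
    if ch = '{' then (grpLen (d + 1) t).map (· + 1)
    else if ch = '}' then
      if d - 1 = 0 then some 1 else (grpLen (d - 1) t).map (· + 1)
    else (grpLen d t).map (· + 1)

def resOf (length i : Int) : Option Nat → Int
  | some k => i + k
  | none => length

lemma grpLen_noClose (d : Int) (l : List Char) (h : '}' ∉ l) : grpLen d l = none := by
  induction l generalizing d with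
  | nil => rfl
  | cons ch t ih =>
    simp only [List.mem_cons, not_or] at h
    have h2 : ¬ ch = '}' := fun hc => h.1 hc.symm
    by_cases h1 : ch = '{'
    · simp [grpLen, h1, ih _ h.2]
    · simp [grpLen, h1, h2, ih _ h.2]

lemma grpLen_skip (d : Int) (l : List Char) (k : Nat)
    (h : ∀ x ∈ l.take k, x ≠ '{' ∧ x ≠ '}') :
    grpLen d l = (grpLen d (l.drop k)).map (· + k) := by
  induction k generalizing l d with
  | zero => simp only [List.drop_zero]; cases grpLen d l <;> simp
  | succ k ih =>
    cases l with
    | nil => simp [grpLen]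
    | cons ch t =>
      have hc := h ch (by simp)
      have ht : ∀ x ∈ t.take k, x ≠ '{' ∧ x ≠ '}' := fun x hx => h x (by simp [hx])
      simp only [grpLen, if_neg hc.1, if_neg hc.2, ih _ _ ht, List.drop_succ_cons]
      cases grpLen d (t.drop k) <;> simp <;> omega

-- Python's data.find(ch, i) for 0 ≤ i: either -1 with no occurrence at/after i, or the first occurrence
lemma singleton_prefix (l : List Char) (c : Char) : [c] <+: l ↔ l.head? = some c := by
  cases l with
  | nil => simp
  | cons a t => simp [List.cons_prefix_cons, eq_comm]

lemma findFrom_char_none (cs : List Char) (ch : Char) (i : Int) (h0 : 0 ≤ i) :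
    PySem.Chars.findFrom cs [ch] i none = -1 ↔ ch ∉ cs.drop i.toNat := by
  by_cases hk : i.toNat ≤ cs.length
  · have hi : i = ((i.toNat : Nat) : Int) := by omega
    rw [hi, PySem.Chars.findFrom_natCast_eq_neg_one_iff cs [ch] i.toNat hk,
        List.singleton_infix_iff]
    simp only [Int.toNat_natCast]
  · have hd : cs.drop i.toNat = [] := List.drop_of_length_le (by omega)
    simp only [hd, List.not_mem_nil]
    simp only [PySem.Chars.findFrom]
    rw [if_pos (by omega)]
    simp

lemma findFrom_char_some (cs : List Char) (ch : Char) (i : Int) (h0 : 0 ≤ i)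
    (h : PySem.Chars.findFrom cs [ch] i none ≠ -1) :
    ∃ j : Nat, PySem.Chars.findFrom cs [ch] i none = i + j ∧
      (cs.drop i.toNat)[j]? = some ch ∧ ∀ m < j, (cs.drop i.toNat)[m]? ≠ some ch := by
  have hk : i.toNat ≤ cs.length := by
    by_contra hk
    exact h ((findFrom_char_none cs ch i h0).mpr (by
      rw [List.drop_of_length_le (by omega)]; simp))
  have hi : i = ((i.toNat : Nat) : Int) := by omega
  rw [hi] at h ⊢
  rw [PySem.Chars.findFrom_natCast cs [ch] i.toNat hk] at h ⊢
  set r := PySem.Chars.find (cs.drop i.toNat) [ch] with hr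
  have hrne : r ≠ -1 := by intro hc; rw [if_pos hc] at h; exact h rfl
  rw [if_neg hrne] at ⊢
  have hrpos : 0 ≤ r := by
    have := PySem.Chars.neg_one_le_find (cs.drop i.toNat) [ch]
    omega
  obtain ⟨hpre, hmin⟩ := PySem.Chars.find_spec hrpos
  refine ⟨r.toNat, by omega, ?_, ?_⟩
  · rw [← List.head?_drop]
    exact (singleton_prefix _ _).mp hpre
  · intro m hm hcontra
    exact hmin m hm ((singleton_prefix _ _).mpr (by rw [List.head?_drop]; exact hcontra))


lemma skipAGo_eq (cs : List Char) (fuel : Nat) (d i : Int) (h0 : 0 ≤ i)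
    (hf : ((cs.length : Int) - i).toNat < fuel) :
    skipAGo cs (cs.length : Int) d i fuel = resOf (cs.length : Int) i (grpLen d (cs.drop i.toNat)) := by
  induction fuel generalizing d i with
  | zero => omega
  | succ fuel ih =>
    by_cases hi : i < (cs.length : Int)
    · have hlt : i.toNat < cs.length := by omega
      have hget : PySem.List.pyGet? cs i = some cs[i.toNat] := by
        have : i = ((i.toNat : Nat) : Int) := by omega
        conv_lhs => rw [this]
        rw [PySem.List.pyGet?_natCast, List.getElem?_eq_getElem hlt]
      have hdrop : cs.drop i.toNat = cs[i.toNat] :: cs.drop (i.toNat + 1) :=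
        List.drop_eq_getElem_cons hlt
      have hn : (i + 1).toNat = i.toNat + 1 := by omega
      simp only [skipAGo, if_pos hi, hget, hdrop, grpLen]
      by_cases h1 : cs[i.toNat] = '{'
      · rw [if_pos h1, if_pos h1, ih (d+1) (i+1) (by omega) (by omega), hn]
        cases grpLen (d+1) (cs.drop (i.toNat+1)) <;> simp [resOf] <;> omega
      · rw [if_neg h1, if_neg h1]
        by_cases h2 : cs[i.toNat] = '}'
        · rw [if_pos h2, if_pos h2]
          by_cases h3 : d - 1 = 0
          · rw [if_pos h3, if_pos h3]; simp [resOf]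
          · rw [if_neg h3, if_neg h3, ih (d-1) (i+1) (by omega) (by omega), hn]
            cases grpLen (d-1) (cs.drop (i.toNat+1)) <;> simp [resOf] <;> omega
        · rw [if_neg h2, if_neg h2, ih d (i+1) (by omega) (by omega), hn]
          cases grpLen d (cs.drop (i.toNat+1)) <;> simp [resOf] <;> omega
    · have hd : cs.drop i.toNat = [] := List.drop_of_length_le (by omega)
      simp [skipAGo, if_neg hi, hd, grpLen, resOf]

lemma skipBGo_eq (cs : List Char) (fuel : Nat) (d i : Int) (h0 : 0 ≤ i)
    (hf : ((cs.length : Int) - i).toNat < fuel) :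
    skipBGo cs (cs.length : Int) d i fuel = resOf (cs.length : Int) i (grpLen d (cs.drop i.toNat)) := by
  induction fuel generalizing d i with
  | zero => omega
  | succ fuel ih =>
    simp only [skipBGo]
    by_cases hc : PySem.Chars.findFrom cs ['}'] i none = -1
    · rw [if_pos hc]
      rw [grpLen_noClose d _ ((findFrom_char_none cs '}' i h0).mp hc)]
      rfl
    · rw [if_neg hc]
      obtain ⟨jc, hceq, hcget, hcmin⟩ := findFrom_char_some cs '}' i h0 hc
      obtain ⟨hjc, hcval⟩ := List.getElem?_eq_some_iff.mp hcget
      have hlen : (cs.drop i.toNat).length = cs.length - i.toNat := List.length_drop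
      have hilen : i.toNat < cs.length := by omega
      by_cases ho : PySem.Chars.findFrom cs ['{'] i none ≠ -1 ∧
          PySem.Chars.findFrom cs ['{'] i none < PySem.Chars.findFrom cs ['}'] i none
      · rw [if_pos ho]
        obtain ⟨jo, hoeq, hoget, homin⟩ := findFrom_char_some cs '{' i h0 ho.1
        obtain ⟨hjo, hoval⟩ := List.getElem?_eq_some_iff.mp hoget
        have hjojc : jo < jc := by omega
        have hpref : ∀ x ∈ (cs.drop i.toNat).take jo, x ≠ '{' ∧ x ≠ '}' := by
          intro x hx
          rw [List.mem_take_iff_getElem] at hx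
          obtain ⟨m, hm, rfl⟩ := hx
          have hm' : m < jo := by omega
          have hg : (cs.drop i.toNat)[m]? = some (cs.drop i.toNat)[m] :=
            List.getElem?_eq_getElem _
          constructor
          · intro hval; exact homin m hm' (by rw [hg, hval])
          · intro hval; exact hcmin m (by omega) (by rw [hg, hval])
        rw [grpLen_skip d _ jo hpref,
            List.drop_eq_getElem_cons hjo, hoval]
        simp only [grpLen, if_pos (rfl : '{' = '{')]
        have hdd : (cs.drop i.toNat).drop (jo + 1) =
            cs.drop ((PySem.Chars.findFrom cs ['{'] i none + 1).toNat) := by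
          rw [List.drop_drop]
          congr 1
          omega
        rw [hdd, ih (d + 1) _ (by omega) (by omega)]
        cases grpLen (d + 1) (cs.drop ((PySem.Chars.findFrom cs ['{'] i none + 1).toNat)) <;>
          simp [resOf, Option.map_map] <;> omega
      · rw [if_neg ho]
        have hpref : ∀ x ∈ (cs.drop i.toNat).take jc, x ≠ '{' ∧ x ≠ '}' := by
          intro x hx
          rw [List.mem_take_iff_getElem] at hx
          obtain ⟨m, hm, rfl⟩ := hx
          have hm' : m < jc := by omega
          have hg : (cs.drop i.toNat)[m]? = some (cs.drop i.toNat)[m] :=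
            List.getElem?_eq_getElem _
          refine ⟨?_, fun hval => hcmin m hm' (by rw [hg, hval])⟩
          by_cases hno : PySem.Chars.findFrom cs ['{'] i none = -1
          · have hnotin := (findFrom_char_none cs '{' i h0).mp hno
            intro hval
            exact hnotin (hval ▸ List.getElem_mem _)
          · obtain ⟨jo, hoeq, _, homin⟩ := findFrom_char_some cs '{' i h0 hno
            have hjo_ge : jc ≤ jo := by
              rcases not_and_or.mp ho with h | h
              · exact absurd hno (not_not.mpr (not_not.mp (by simpa using h)))
              · omega
            intro hval; exact homin m (by omega) (by rw [hg, hval])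
        rw [grpLen_skip d _ jc hpref,
            List.drop_eq_getElem_cons hjc, hcval]
        have hgrp : grpLen d ('}' :: (cs.drop i.toNat).drop (jc + 1)) =
            if d - 1 = 0 then some 1
            else (grpLen (d - 1) ((cs.drop i.toNat).drop (jc + 1))).map (· + 1) := by
          simp [grpLen]
        rw [hgrp]
        by_cases hd1 : d - 1 = 0
        · rw [if_pos hd1, if_pos hd1]
          simp only [Option.map_some, resOf]
          omega
        · rw [if_neg hd1, if_neg hd1]
          have hdd : (cs.drop i.toNat).drop (jc + 1) =
              cs.drop ((PySem.Chars.findFrom cs ['}'] i none + 1).toNat) := by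
            rw [List.drop_drop]
            congr 1
            omega
          rw [hdd, ih (d - 1) _ (by omega) (by omega)]
          cases grpLen (d - 1) (cs.drop ((PySem.Chars.findFrom cs ['}'] i none + 1).toNat)) <;>
            simp [resOf, Option.map_map] <;> omega

-- ===== VERDICT (by name: the statement is the Claim_ definition above) =====
theorem skip_group_py_spec : Claim_equal_skip_group_py := by
  intro data index _ hpre
  unfold Spec_skip_group_py skip_group_py skip_group_py_alt
  rw [skipAGo_eq _ _ _ _ hpre (by omega), skipBGo_eq _ _ _ _ hpre (by omega)]
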